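-- pv_equiv track=rewrite | github.com/UTSAVS26/PySnippets | pysnippets/maths/pascals_triangle.py | polynomial_expansion
-- ===== SOURCE A (Python) =====
-- def get_pascals_triangle_row(n):
--     """
--     Get a specific row from Pascal's Triangle.
--
--     Args:
--         n (int): The index of the row to retrieve (0-based index).
--
--     Returns:
--         list: The nth row of Pascal's Triangle.
--     """
--     if n < 0:
--         raise ValueError("n' must be a non-negative integer.")
--     row = [1]
--     for k in range(1, n + 1):
--         row.append(row[-1] * (n - k + 1) // k)
--     return row
--
-- def polynomial_expansion(a, b, n):
--     """
--     Expand the binomial expression (a + b)^n using Pascal's Triangle.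
--
--     Args:
--         a (int): The coefficient of the first term.
--         b (int): The coefficient of the second term.
--         n (int): The power to which the binomial is raised.
--
--     Returns:
--         str: The expanded form of the binomial expression.
--     """
--     row = get_pascals_triangle_row(n)
--     terms = []
--     for k in range(n + 1):
--         coefficient = row[k]
--         term = f"{coefficient}*{a}^{n - k}*{b}^{k}"
--         terms.append(term)
--     return ' + '.join(terms)
-- ===== SOURCE B (Python) =====
-- import math
--
-- def polynomial_expansion(a, b, n):
--     if n < 0:
--         raise ValueError("n' must be a non-negative integer.")
--     return ' + '.join(f"{math.comb(n, k)}*{a}^{n - k}*{b}^{k}" for k in range(n + 1))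
-- ===== Notes on version B (the rewrite author's own statement) =====
-- stated objective: idiomatic
-- what changed: Each coefficient is computed independently with math.comb(n,k) while formatting, instead of first building the whole Pascal row by the incremental multiplicative recurrence and then indexing into it.
import Mathlib
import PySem

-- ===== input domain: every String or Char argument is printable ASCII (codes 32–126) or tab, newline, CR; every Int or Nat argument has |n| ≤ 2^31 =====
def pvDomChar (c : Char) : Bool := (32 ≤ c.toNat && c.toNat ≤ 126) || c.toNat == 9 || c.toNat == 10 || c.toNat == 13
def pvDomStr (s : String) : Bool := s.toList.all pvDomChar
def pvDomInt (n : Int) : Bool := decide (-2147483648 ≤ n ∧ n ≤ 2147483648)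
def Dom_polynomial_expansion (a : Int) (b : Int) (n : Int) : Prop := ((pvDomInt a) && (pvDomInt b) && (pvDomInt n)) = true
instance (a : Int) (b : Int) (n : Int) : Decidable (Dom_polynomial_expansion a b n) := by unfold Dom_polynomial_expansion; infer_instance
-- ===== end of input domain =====

-- B computes each binomial coefficient directly (math.comb) while formatting, instead of
-- A's table-first incremental Pascal-row pass; equivalence of RETURN values on n ≥ 0
-- (both raise ValueError for n < 0, excluded by Pre_). Objective: idiomatic.

-- ===== PORT A =====
-- get_pascals_triangle_row, for n ≥ 0 (the n < 0 raise is handled by the caller's guard below).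
-- row[-1] is ported as pyGetD row (-1) 0; the row is never empty so Python never raises there.
def pvRowA (n : Int) : List Int :=
  (PySem.List.pyRange 1 (n + 1) 1).foldl
    (fun row k => row ++ [PySem.Int.floordiv (PySem.List.pyGetD row (-1) 0 * (n - k + 1)) k])
    [1]

def polynomial_expansion (a : Int) (b : Int) (n : Int) : String :=
  if n < 0 then ""   -- Python raises ValueError here; excluded by Pre_
  else
    let row := pvRowA n
    let terms := (PySem.List.pyRange 0 (n + 1) 1).map (fun k =>
      PySem.Int.toStr (PySem.List.pyGetD row k 0) ++ "*" ++ PySem.Int.toStr a ++ "^" ++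
        PySem.Int.toStr (n - k) ++ "*" ++ PySem.Int.toStr b ++ "^" ++ PySem.Int.toStr k)
    String.intercalate " + " terms

-- ===== PORT B =====
-- math.comb(n, k) is ported as Nat.choose.
def polynomial_expansion_alt (a : Int) (b : Int) (n : Int) : String :=
  if n < 0 then ""   -- Python raises ValueError here; excluded by Pre_
  else
    String.intercalate " + " ((PySem.List.pyRange 0 (n + 1) 1).map (fun k =>
      PySem.Int.toStr ((n.toNat.choose k.toNat : Nat) : Int) ++ "*" ++ PySem.Int.toStr a ++ "^" ++
        PySem.Int.toStr (n - k) ++ "*" ++ PySem.Int.toStr b ++ "^" ++ PySem.Int.toStr k))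

-- ===== PRECONDITION & SPEC =====
-- Both Pythons raise ValueError for n < 0; Pre_ admits exactly the inputs where A returns.
def Pre_polynomial_expansion (a : Int) (b : Int) (n : Int) : Prop := 0 ≤ n
instance (a : Int) (b : Int) (n : Int) : Decidable (Pre_polynomial_expansion a b n) := by
  unfold Pre_polynomial_expansion; infer_instance

def pvWitness_polynomial_expansion : Int × Int × Int := (2, -3, 4)

def Spec_polynomial_expansion (a : Int) (b : Int) (n : Int) (out : String) : Prop :=
  out = polynomial_expansion_alt a b n
instance (a : Int) (b : Int) (n : Int) (out : String) : Decidable (Spec_polynomial_expansion a b n out) := by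
  unfold Spec_polynomial_expansion; infer_instance

-- ===== CLAIM (what is proved, stated in full; the proofs are below) =====
def Claim_equal_polynomial_expansion : Prop :=
  ∀ (a : Int) (b : Int) (n : Int), Dom_polynomial_expansion a b n →
    Pre_polynomial_expansion a b n →
    Spec_polynomial_expansion a b n (polynomial_expansion a b n)

-- ===== LEMMAS AND PROOFS =====

-- A's incremental row, after consuming range(1, m+1), is exactly the binomial coefficients C(N, 0..m).
theorem pvRowA_prefix (N m : Nat) (h : m ≤ N) :
    (PySem.List.pyRange 1 ((m : Int) + 1) 1).foldl
      (fun row k => row ++ [PySem.Int.floordiv (PySem.List.pyGetD row (-1) 0 * ((N : Int) - k + 1)) k])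
      [1]
    = (List.range (m + 1)).map (fun k => (N.choose k : Int)) := by
  induction m with
  | zero => simp
  | succ m ih =>
    have hm : m ≤ N := Nat.le_of_succ_le h
    have hsplit : PySem.List.pyRange 1 ((↑(m + 1) : Int) + 1) 1
        = PySem.List.pyRange 1 ((m : Int) + 1) 1 ++ [((m : Int) + 1)] := by
      have h2 : (↑(m + 1) : Int) + 1 = ((m : Int) + 1) + 1 := by push_cast; ring
      rw [h2]; exact PySem.List.pyRange_one_succ_right (by omega)
    rw [hsplit, List.foldl_append, ih hm]
    simp only [List.foldl_cons, List.foldl_nil]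
    have hlast : PySem.List.pyGetD ((List.range (m + 1)).map (fun k => (N.choose k : Int))) (-1) 0
        = (N.choose m : Int) := by
      rw [List.range_succ, List.map_append]
      simp [PySem.List.pyGetD, PySem.List.pyGet?, PySem.List.pyIdx?]
    rw [hlast]
    have hco : (N.choose m : Int) * ((N : Int) - ((m : Int) + 1) + 1)
        = ((N.choose m * (N - m) : Nat) : Int) := by
      push_cast [Nat.cast_sub hm]; ring
    have hdiv : PySem.Int.floordiv ((N.choose m * (N - m) : Nat) : Int) ((m : Int) + 1)
        = (N.choose (m + 1) : Int) := by
      have h1 : ((m : Int) + 1) = ((m + 1 : Nat) : Int) := by push_cast; ring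
      rw [h1, PySem.Int.floordiv_natCast, ← Nat.choose_succ_right_eq,
        Nat.mul_div_cancel _ (Nat.succ_pos m)]
    rw [hco, hdiv]
    simp [List.range_succ]

theorem pvRowA_eq (n : Int) (hn : 0 ≤ n) :
    pvRowA n = (List.range (n.toNat + 1)).map (fun k => (n.toNat.choose k : Int)) := by
  unfold pvRowA
  have h : n = (n.toNat : Int) := (Int.toNat_of_nonneg hn).symm
  rw [h]
  exact pvRowA_prefix n.toNat n.toNat le_rfl

-- ===== VERDICT (by name: the statement is the Claim_ definition above) =====
theorem polynomial_expansion_spec : Claim_equal_polynomial_expansion := by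
  intro a b n _ hn
  unfold Pre_polynomial_expansion at hn
  unfold Spec_polynomial_expansion polynomial_expansion polynomial_expansion_alt
  rw [if_neg (by omega), if_neg (by omega)]
  simp only []
  congr 1
  apply List.map_congr_left
  intro k hk
  have hk' := (PySem.List.mem_pyRange_one).1 hk
  have hrow : PySem.List.pyGetD (pvRowA n) k 0 = ((n.toNat.choose k.toNat : Nat) : Int) := by
    rw [pvRowA_eq n hn]
    have hkk : k = (k.toNat : Int) := (Int.toNat_of_nonneg hk'.1).symm
    rw [hkk, PySem.List.pyGetD_natCast]
    exact PySem.List.getD_map_range _ _ _ _ (by omega)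
  rw [hrow]
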